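-- pv_equiv track=rewrite | github.com/getnikola/nikola | nikola/plugins/command_new_post.py | filter_post_pages
-- ===== SOURCE A (Python) =====
-- def filter_post_pages(compiler, is_post, post_compilers, post_pages):
--     """Given a compiler ("markdown", "rest"), and whether it's meant for
--     a post or a page, and post_compilers, return the correct entry from
--     post_pages."""
--
--     # First throw away all the post_pages with the wrong is_post
--     filtered = [entry for entry in post_pages if entry[3] == is_post]
--
--     # These are the extensions supported by the required format
--     extensions = post_compilers[compiler]
--
--     # Throw away the post_pages with the wrong extensions
--     filtered = [entry for entry in filtered if any([ext in entry[0] for ext in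
--                                                     extensions])]
--
--     if not filtered:
--         type_name = "post" if is_post else "page"
--         raise Exception("Can't find a way, using your configuration, to create "
--                         "a {0} in format {1}. You may want to tweak "
--                         "post_compilers or post_pages in conf.py".format(
--                             type_name, compiler))
--     return filtered[0]
-- ===== SOURCE B (Python) =====
-- def filter_post_pages(compiler, is_post, post_compilers, post_pages):
--     """Recursive head/tail scan that returns the first entry matching both
--     conditions, instead of two staged list-comprehension filter passes."""
--     extensions = post_compilers[compiler]
--
--     def pick(entries):
--         if not entries:
--             type_name = "post" if is_post else "page"
--             raise Exception("Can't find a way, using your configuration, to create "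
--                             "a {0} in format {1}. You may want to tweak "
--                             "post_compilers or post_pages in conf.py".format(
--                                 type_name, compiler))
--         head = entries[0]
--         if head[3] == is_post and any(ext in head[0] for ext in extensions):
--             return head
--         return pick(entries[1:])
--
--     return pick(post_pages)
-- ===== Notes on version B (the rewrite author's own statement) =====
-- stated objective: alternative
-- what changed: Replaces A's two staged list-comprehension filter passes plus head indexing with a recursive head/tail scan that checks both conditions at once and returns the first matching entry immediately.
import Mathlib
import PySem

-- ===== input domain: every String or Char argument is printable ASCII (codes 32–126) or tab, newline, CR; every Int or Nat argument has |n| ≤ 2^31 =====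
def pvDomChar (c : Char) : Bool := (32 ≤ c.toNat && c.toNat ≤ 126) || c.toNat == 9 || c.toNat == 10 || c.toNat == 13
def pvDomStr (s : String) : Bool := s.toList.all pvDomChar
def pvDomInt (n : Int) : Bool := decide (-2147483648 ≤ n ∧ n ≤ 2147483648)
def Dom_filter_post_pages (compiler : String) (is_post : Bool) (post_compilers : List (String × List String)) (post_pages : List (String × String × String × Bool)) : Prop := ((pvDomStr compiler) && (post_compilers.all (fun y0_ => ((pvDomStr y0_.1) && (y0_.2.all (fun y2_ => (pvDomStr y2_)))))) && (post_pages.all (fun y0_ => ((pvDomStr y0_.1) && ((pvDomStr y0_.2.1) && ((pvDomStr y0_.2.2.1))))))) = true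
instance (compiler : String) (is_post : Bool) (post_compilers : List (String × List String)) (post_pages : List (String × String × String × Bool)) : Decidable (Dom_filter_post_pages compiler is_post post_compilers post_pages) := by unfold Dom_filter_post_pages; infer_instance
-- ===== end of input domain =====

-- B replaces A's two staged filter passes by a recursive head/tail scan checking both conditions at once; equal return value wherever A returns (Pre_ excludes A's two raising cases).


-- ===== PORT A =====
-- A: filter by is_post, look up extensions (KeyError if absent), filter again by
-- extension substring match, return filtered[0] (Exception if empty).  Both raising
-- cases are excluded by Pre_filter_post_pages; the port returns a dummy tuple there.
def filter_post_pages (compiler : String) (is_post : Bool) (post_compilers : List (String × List String)) (post_pages : List (String × String × String × Bool)) : String × String × String × Bool :=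
  let filtered := post_pages.filter (fun entry => entry.2.2.2 == is_post)
  match (PySem.Dict.mk post_compilers).get? compiler with
  | none => ("", "", "", false)  -- Python: KeyError (outside Pre_)
  | some extensions =>
    let filtered2 := filtered.filter (fun entry => extensions.any (fun ext => PySem.Str.isIn ext entry.1))
    match filtered2 with
    | [] => ("", "", "", false)  -- Python: raise Exception (outside Pre_)
    | e :: _ => e

-- ===== PORT B =====
-- B's recursive helper `pick`: first matching entry, or none (Python: raise, outside Pre_).
def pickEntry (is_post : Bool) (extensions : List String) : List (String × String × String × Bool) → Option (String × String × String × Bool)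
  | [] => none
  | head :: rest =>
    if head.2.2.2 == is_post && extensions.any (fun ext => PySem.Str.isIn ext head.1) then
      some head
    else
      pickEntry is_post extensions rest

def filter_post_pages_alt (compiler : String) (is_post : Bool) (post_compilers : List (String × List String)) (post_pages : List (String × String × String × Bool)) : String × String × String × Bool :=
  match (PySem.Dict.mk post_compilers).get? compiler with
  | none => ("", "", "", false)  -- Python: KeyError (outside Pre_)
  | some extensions =>
    match pickEntry is_post extensions post_pages with
    | some e => e
    | none => ("", "", "", false)  -- Python: raise Exception (outside Pre_)

-- ===== PRECONDITION & SPEC =====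
-- Pre_ excludes exactly the inputs where the Python raises: compiler missing from
-- post_compilers (KeyError) or no entry matching both conditions (explicit Exception).
-- Note: if the compiler is missing, getD gives [] and the inner ∃ is false.
def Pre_filter_post_pages (compiler : String) (is_post : Bool) (post_compilers : List (String × List String)) (post_pages : List (String × String × String × Bool)) : Prop :=
  ∃ entry ∈ post_pages, entry.2.2.2 = is_post ∧
    ∃ ext ∈ (PySem.Dict.mk post_compilers).getD compiler [], PySem.Str.isIn ext entry.1 = true
instance (compiler : String) (is_post : Bool) (post_compilers : List (String × List String)) (post_pages : List (String × String × String × Bool)) : Decidable (Pre_filter_post_pages compiler is_post post_compilers post_pages) := by unfold Pre_filter_post_pages; infer_instance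

def pvWitness_filter_post_pages : String × Bool × (List (String × List String)) × (List (String × String × String × Bool)) :=
  ("markdown", true, [("markdown", [".md"])], [("posts/*.md", "title", "out", true)])

def Spec_filter_post_pages (compiler : String) (is_post : Bool) (post_compilers : List (String × List String)) (post_pages : List (String × String × String × Bool)) (out : String × String × String × Bool) : Prop := out = filter_post_pages_alt compiler is_post post_compilers post_pages
instance (compiler : String) (is_post : Bool) (post_compilers : List (String × List String)) (post_pages : List (String × String × String × Bool)) (out : String × String × String × Bool) : Decidable (Spec_filter_post_pages compiler is_post post_compilers post_pages out) := by unfold Spec_filter_post_pages; infer_instance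

-- ===== CLAIM =====
def Claim_equal_filter_post_pages : Prop := ∀ (compiler : String) (is_post : Bool) (post_compilers : List (String × List String)) (post_pages : List (String × String × String × Bool)), Dom_filter_post_pages compiler is_post post_compilers post_pages → Pre_filter_post_pages compiler is_post post_compilers post_pages → Spec_filter_post_pages compiler is_post post_compilers post_pages (filter_post_pages compiler is_post post_compilers post_pages)

-- ===== LEMMAS AND PROOFS =====
-- B's recursive scan equals the head of A's double filter.
theorem pickEntry_eq_head_filter_filter (is_post : Bool) (extensions : List String) (l : List (String × String × String × Bool)) :
    pickEntry is_post extensions l =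
      (((l.filter (fun entry => entry.2.2.2 == is_post)).filter
        (fun entry => extensions.any (fun ext => PySem.Str.isIn ext entry.1))).head?) := by
  induction l with
  | nil => rfl
  | cons x xs ih =>
    cases hp : (x.2.2.2 == is_post) <;>
      cases hq : (extensions.any (fun ext => PySem.Str.isIn ext x.1)) <;>
        simp only [pickEntry, List.filter_cons, hp, hq, Bool.true_and, Bool.false_and,
          if_true, if_false, List.head?_cons, ih, Bool.false_eq_true]

-- ===== VERDICT =====
theorem filter_post_pages_spec : Claim_equal_filter_post_pages := by
  intro compiler is_post post_compilers post_pages _ _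
  unfold Spec_filter_post_pages filter_post_pages filter_post_pages_alt
  cases hx : (PySem.Dict.mk post_compilers).get? compiler with
  | none => simp
  | some extensions =>
    simp only []
    rw [pickEntry_eq_head_filter_filter]
    cases h : (post_pages.filter (fun entry => entry.2.2.2 == is_post)).filter
        (fun entry => extensions.any (fun ext => PySem.Str.isIn ext entry.1)) with
    | nil => simp
    | cons e rest => simp
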